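-- pv_equiv track=rewrite | github.com/vercah/string-attractors | attractor_module.py | check_subfactors
-- ===== SOURCE A (Python) =====
-- from typing import Tuple
--
-- def check_subfactors(start: int, end: int, word: list, attr: list, factors: dict) -> Tuple[bool, list]:
--     for i in range(1, end-start+2): # goes through different lengths of factors
--         for j in range(start, end+2-i):
--             current = word[j:j+i]
--             if str(current) not in factors.keys(): # if it is, it has been already checked before
--                 result = crosses_attractor(current, word, attr)
--                 if (result is not None):
--                     factors[str(current)] = result
--                 else:
--                     return False, word[j:j+i]
--     return True, None
--
-- def crosses_attractor(factor: list, word: list, attr: list) -> int: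
--     for at in attr:
--         if at not in range(len(word)):
--             continue
--         for i in range(max(0, at-len(word)+len(factor)), min(len(factor)-1, at)+1):
--             is_in = True
--             for j in range(0, len(factor)):
--                 if factor[j] != word[at-i+j]:
--                     is_in = False
--                     break
--             if is_in:
--                 return at
--     return None
-- ===== SOURCE B (Python) =====
-- from typing import Tuple
--
-- def check_subfactors(start: int, end: int, word: list, attr: list, factors: dict) -> Tuple[bool, list]:
--     n = len(word)
--     attr_set = {a for a in attr if 0 <= a < n}
--     seen = set(factors.keys())
--     for i in range(1, end - start + 2):
--         for j in range(start, end + 2 - i):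
--             current = word[j:j+i]
--             key = str(current)
--             if key in seen:
--                 continue
--             seen.add(key)
--             if not is_covered(current, word, attr_set):
--                 return False, current
--     return True, None
--
-- def is_covered(factor: list, word: list, attr_set: set) -> bool:
--     L = len(factor)
--     for p in range(len(word) - L + 1):
--         if word[p:p+L] == factor and any(p + k in attr_set for k in range(L)):
--             return True
--     return False
-- ===== Notes on version B (the rewrite author's own statement) =====
-- stated objective: alternative
-- what changed: The attractor-crossing test is replaced: instead of iterating attractor positions and alignments with a hand-rolled char-compare loop, B precomputes the set of valid attractor positions once and scans occurrence start positions of the factor in the word via slice comparison; the mutated factors dict becomes a local 'seen' set of keys (B does not mutate the caller's dict).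
import Mathlib
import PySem

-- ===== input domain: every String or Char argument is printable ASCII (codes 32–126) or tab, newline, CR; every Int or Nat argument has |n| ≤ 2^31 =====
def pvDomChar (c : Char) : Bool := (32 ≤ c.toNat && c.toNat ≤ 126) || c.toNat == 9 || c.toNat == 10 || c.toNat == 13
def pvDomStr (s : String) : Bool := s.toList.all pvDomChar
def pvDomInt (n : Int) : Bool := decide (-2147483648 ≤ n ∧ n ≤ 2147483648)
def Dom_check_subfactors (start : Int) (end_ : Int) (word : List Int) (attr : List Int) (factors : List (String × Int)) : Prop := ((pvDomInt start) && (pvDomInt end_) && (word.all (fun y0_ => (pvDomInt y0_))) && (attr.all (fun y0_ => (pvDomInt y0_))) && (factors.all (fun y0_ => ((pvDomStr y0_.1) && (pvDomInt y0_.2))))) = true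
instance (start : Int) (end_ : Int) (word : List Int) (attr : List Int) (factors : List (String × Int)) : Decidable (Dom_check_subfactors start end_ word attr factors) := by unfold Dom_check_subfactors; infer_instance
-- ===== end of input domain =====

-- ===== PORT A =====
-- B differs by replacing the attractor-centric crossing test with an occurrence scan over the
-- word against a precomputed set of valid attractor positions, and a local 'seen' key set instead
-- of mutating the factors dict (A mutates its dict argument in place; equivalence here is about
-- the RETURN value only — B performs no such mutation).

-- str(list of ints), e.g. "[1, 2]" / "[]" — shared faithful transliteration of Python's str(current)
def pyKey (xs : List Int) : String :=
  String.ofList ('[' :: PySem.Chars.join [',', ' '] (xs.map PySem.Int.toChars) ++ [']'])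

-- inner 'is_in' loop of crosses_attractor (break-on-mismatch = all over range(len(factor)))
def pvIsIn (factor word : List Int) (at_ i : Int) : Bool :=
  (PySem.List.pyRange 0 (PySem.List.len factor) 1).all
    (fun j => PySem.List.pyGetD factor j 0 == PySem.List.pyGetD word (at_ - i + j) 0)

def crosses_attractor (factor word : List Int) : List Int → Option Int
  | [] => none
  | at_ :: rest =>
    if ¬ (0 ≤ at_ ∧ at_ < PySem.List.len word) then crosses_attractor factor word rest
    else if (PySem.List.pyRange (max 0 (at_ - PySem.List.len word + PySem.List.len factor))
               (min (PySem.List.len factor - 1) at_ + 1) 1).any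
               (fun i => pvIsIn factor word at_ i)
    then some at_
    else crosses_attractor factor word rest

-- inner 'for j in range(start, end+2-i)' loop, threading the mutated dict; some res = early return.
-- The range is walked with a counter j and fuel = its length (Python's range is lazy and the loop
-- can return early, so the range must not be materialized), one step per Python iteration.
def csJ (word attr : List Int) (i : Int) :
    PySem.Dict String Int → Int → Nat → Option (Bool × Option (List Int)) × PySem.Dict String Int
  | d, _, 0 => (none, d)
  | d, j, fuel + 1 =>
    let current := PySem.List.slice word (some j) (some (j + i))
    if d.contains (pyKey current) then csJ word attr i d (j + 1) fuel
    else
      match crosses_attractor current word attr with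
      | some result => csJ word attr i (d.insert (pyKey current) result) (j + 1) fuel
      | none => (some (false, some (PySem.List.slice word (some j) (some (j + i)))), d)

-- outer 'for i in range(1, end-start+2)' loop, same counter-with-fuel shape
def csI (start end_ : Int) (word attr : List Int) :
    PySem.Dict String Int → Int → Nat → Bool × Option (List Int)
  | _, _, 0 => (true, none)
  | d, i, fuel + 1 =>
    match csJ word attr i d start ((end_ + 2 - i) - start).toNat with
    | (some res, _) => res
    | (none, d') => csI start end_ word attr d' (i + 1) fuel

def check_subfactors (start : Int) (end_ : Int) (word : List Int) (attr : List Int)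
    (factors : List (String × Int)) : Bool × Option (List Int) :=
  csI start end_ word attr (PySem.Dict.ofList factors) 1 ((end_ - start + 2) - 1).toNat

-- ===== PORT B =====

-- does some occurrence of factor in word contain a (valid) attractor position?
def is_covered (factor word : List Int) (attrSet : PySem.Set Int) : Bool :=
  (PySem.List.pyRange 0 (PySem.List.len word - PySem.List.len factor + 1) 1).any
    (fun p =>
      (PySem.List.slice word (some p) (some (p + PySem.List.len factor)) == factor)
        && (PySem.List.pyRange 0 (PySem.List.len factor) 1).any
             (fun k => PySem.Set.contains attrSet (p + k)))

-- B's loops walk the (possibly huge, lazily consumed) ranges with a counter and fuel too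
def csAltJ (word : List Int) (attrSet : PySem.Set Int) (i : Int) :
    PySem.Set String → Int → Nat → Option (Bool × Option (List Int)) × PySem.Set String
  | seen, _, 0 => (none, seen)
  | seen, j, fuel + 1 =>
    let current := PySem.List.slice word (some j) (some (j + i))
    let key := pyKey current
    if PySem.Set.contains seen key then csAltJ word attrSet i seen (j + 1) fuel
    else
      let seen' := PySem.Set.add seen key
      if is_covered current word attrSet then csAltJ word attrSet i seen' (j + 1) fuel
      else (some (false, some current), seen')

def csAltI (start end_ : Int) (word : List Int) (attrSet : PySem.Set Int) :
    PySem.Set String → Int → Nat → Bool × Option (List Int)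
  | _, _, 0 => (true, none)
  | seen, i, fuel + 1 =>
    match csAltJ word attrSet i seen start ((end_ + 2 - i) - start).toNat with
    | (some res, _) => res
    | (none, seen') => csAltI start end_ word attrSet seen' (i + 1) fuel

def check_subfactors_alt (start : Int) (end_ : Int) (word : List Int) (attr : List Int)
    (factors : List (String × Int)) : Bool × Option (List Int) :=
  let attrSet : PySem.Set Int :=
    PySem.Set.ofList (attr.filter (fun a => decide (0 ≤ a) && decide (a < PySem.List.len word)))
  csAltI start end_ word attrSet (PySem.Set.ofList (factors.map (·.1))) 1
    ((end_ - start + 2) - 1).toNat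

-- ===== PRECONDITION & SPEC =====
def Spec_check_subfactors (start : Int) (end_ : Int) (word : List Int) (attr : List Int) (factors : List (String × Int)) (out : Bool × Option (List Int)) : Prop := out = check_subfactors_alt start end_ word attr factors
instance (start : Int) (end_ : Int) (word : List Int) (attr : List Int) (factors : List (String × Int)) (out : Bool × Option (List Int)) : Decidable (Spec_check_subfactors start end_ word attr factors out) := by unfold Spec_check_subfactors; infer_instance

-- ===== CLAIM (what is proved, stated in full; the proofs are below) =====
def Claim_equal_check_subfactors : Prop := ∀ (start : Int) (end_ : Int) (word : List Int) (attr : List Int) (factors : List (String × Int)), Dom_check_subfactors start end_ word attr factors → Spec_check_subfactors start end_ word attr factors (check_subfactors start end_ word attr factors)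

-- ===== LEMMAS AND PROOFS =====

def pvAttrSet (word attr : List Int) : PySem.Set Int :=
  PySem.Set.ofList (attr.filter (fun a => decide (0 ≤ a) && decide (a < PySem.List.len word)))

theorem pvMatch_iff (factor word : List Int) (p : Int) (hp : 0 ≤ p)
    (hpl : p + (factor.length : Int) ≤ (word.length : Int)) :
    ((PySem.List.pyRange 0 (PySem.List.len factor) 1).all
        (fun j => PySem.List.pyGetD factor j 0 == PySem.List.pyGetD word (p + j) 0)) =
      (PySem.List.slice word (some p) (some (p + PySem.List.len factor)) == factor) := by
  rw [Bool.eq_iff_iff, List.all_eq_true, beq_iff_eq]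
  have hL : PySem.List.len factor = (factor.length : Int) := by simp
  rw [hL, PySem.List.slice_toNat word hp (by omega)]
  have htn : (p + (factor.length:Int)).toNat - p.toNat = factor.length := by omega
  rw [htn]
  have hlen : ((word.drop p.toNat).take factor.length).length = factor.length := by
    rw [List.length_take, List.length_drop]; omega
  constructor
  · intro h
    apply List.ext_getElem (by rw [hlen])
    intro k hk1 hk2
    have hk : k < factor.length := by omega
    have := h (k : Int) (by rw [PySem.List.mem_pyRange_one]; omega)
    rw [beq_iff_eq, PySem.List.pyGetD_eq_getElem factor 0 (by omega) (by exact_mod_cast hk),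
      PySem.List.pyGetD_eq_getElem word 0 (by omega) (by omega)] at this
    simp only [Int.toNat_natCast] at this
    rw [List.getElem_take, List.getElem_drop, this]
    congr 1
    omega
  · intro h j hj
    rw [PySem.List.mem_pyRange_one] at hj
    have hk : j.toNat < factor.length := by omega
    rw [beq_iff_eq, PySem.List.pyGetD_eq_getElem factor 0 (by omega) (by omega),
      PySem.List.pyGetD_eq_getElem word 0 (by omega) (by omega)]
    have h2 : ((word.drop p.toNat).take factor.length)[j.toNat]'(by omega) = factor[j.toNat] := by
      simp only [h]
    rw [List.getElem_take, List.getElem_drop] at h2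
    rw [← h2]
    congr 1
    omega

theorem pvCrosses_none_iff (factor word : List Int) (attr : List Int) :
    crosses_attractor factor word attr = none ↔
      ∀ at_ ∈ attr, (0 ≤ at_ ∧ at_ < (word.length : Int)) →
        ((PySem.List.pyRange (max 0 (at_ - (word.length:Int) + (factor.length:Int)))
            (min ((factor.length:Int) - 1) at_ + 1) 1).any
            (fun i => pvIsIn factor word at_ i)) = false := by
  induction attr with
  | nil => simp [crosses_attractor]
  | cons at_ rest ih =>
    simp only [crosses_attractor, PySem.List.len_eq, List.mem_cons]
    by_cases hv : 0 ≤ at_ ∧ at_ < (word.length : Int)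
    · rw [if_neg (not_not_intro hv)]
      by_cases hany : ((PySem.List.pyRange (max 0 (at_ - (word.length:Int) + (factor.length:Int)))
          (min ((factor.length:Int) - 1) at_ + 1) 1).any
          (fun i => pvIsIn factor word at_ i)) = true
      · rw [if_pos hany]
        constructor
        · intro h; cases h
        · intro h
          have := h at_ (Or.inl rfl) hv
          rw [this] at hany; cases hany
      · rw [if_neg hany, ih]
        constructor
        · rintro h a (rfl | ha) hva
          · exact Bool.eq_false_iff.mpr hany
          · exact h a ha hva
        · intro h a ha hva; exact h a (Or.inr ha) hva
    · rw [if_pos hv, ih]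
      constructor
      · rintro h a (rfl | ha) hva
        · exact absurd hva hv
        · exact h a ha hva
      · intro h a ha hva; exact h a (Or.inr ha) hva

theorem pvCovered_iff (factor word attr : List Int) :
    is_covered factor word (pvAttrSet word attr) = true ↔
      ∃ p k : Int, 0 ≤ p ∧ p + (factor.length:Int) ≤ (word.length:Int) ∧
        (PySem.List.slice word (some p) (some (p + PySem.List.len factor)) == factor) = true ∧
        0 ≤ k ∧ k < (factor.length:Int) ∧ (p + k) ∈ attr ∧
        0 ≤ p + k ∧ p + k < (word.length:Int) := by
  unfold is_covered pvAttrSet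
  rw [List.any_eq_true]
  constructor
  · rintro ⟨p, hp, hpred⟩
    rw [PySem.List.mem_pyRange_one] at hp
    rw [Bool.and_eq_true, List.any_eq_true] at hpred
    obtain ⟨hsl, k, hk, hc⟩ := hpred
    rw [PySem.List.mem_pyRange_one] at hk
    rw [PySem.Set.contains_iff, PySem.Set.mem_ofList, List.mem_filter] at hc
    have hc2 : 0 ≤ p + k ∧ p + k < (word.length:Int) := by simpa using hc.2
    refine ⟨p, k, by omega, by simp at hp ⊢; omega, by simpa using hsl, by omega,
      by simpa using hk.2, hc.1, hc2.1, hc2.2⟩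
  · rintro ⟨p, k, hp, hpl, hsl, hk0, hkL, hmem, hv0, hv1⟩
    refine ⟨p, ?_, ?_⟩
    · rw [PySem.List.mem_pyRange_one]; simp; omega
    · rw [Bool.and_eq_true, List.any_eq_true]
      refine ⟨by simpa using hsl, k, ?_, ?_⟩
      · rw [PySem.List.mem_pyRange_one]; simp; omega
      · rw [PySem.Set.contains_iff, PySem.Set.mem_ofList, List.mem_filter]
        exact ⟨hmem, by simp; omega⟩

theorem pvCross_iff (factor word attr : List Int) :
    (crosses_attractor factor word attr = none) ↔
      (is_covered factor word (pvAttrSet word attr) = false) := by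
  rw [pvCrosses_none_iff, Bool.eq_false_iff]
  constructor
  · intro h hcov
    obtain ⟨p, k, hp, hpl, hsl, hk0, hkL, hmem, hv0, hv1⟩ := pvCovered_iff factor word attr |>.mp hcov
    have hfalse := h (p + k) hmem ⟨hv0, hv1⟩
    have hin : pvIsIn factor word (p + k) k = true := by
      unfold pvIsIn
      simp only [show ∀ j : Int, p + k - k + j = p + j from fun j => by ring]
      rw [pvMatch_iff factor word p hp hpl]
      exact hsl
    have : ((PySem.List.pyRange (max 0 (p + k - (word.length:Int) + (factor.length:Int)))
        (min ((factor.length:Int) - 1) (p + k) + 1) 1).any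
        (fun i => pvIsIn factor word (p + k) i)) = true := by
      rw [List.any_eq_true]
      exact ⟨k, by rw [PySem.List.mem_pyRange_one]; omega, hin⟩
    rw [hfalse] at this; cases this
  · intro h at_ hmem hv
    by_contra hne
    apply h
    rcases Bool.eq_false_or_eq_true ((PySem.List.pyRange (max 0 (at_ - (word.length:Int) + (factor.length:Int)))
        (min ((factor.length:Int) - 1) at_ + 1) 1).any (fun i => pvIsIn factor word at_ i)) with hX | hX
    swap
    · exact absurd hX hne
    rw [List.any_eq_true] at hX
    obtain ⟨i, hi, hin⟩ := hX
    rw [PySem.List.mem_pyRange_one] at hi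
    apply (pvCovered_iff factor word attr).mpr
    refine ⟨at_ - i, i, by omega, by omega, ?_, by omega, by omega, by simpa using hmem, by omega, by omega⟩
    unfold pvIsIn at hin
    rw [pvMatch_iff factor word (at_ - i) (by omega) (by omega)] at hin
    exact hin

theorem pvSetContainsAdd (seen : PySem.Set String) (key k : String) :
    PySem.Set.contains (PySem.Set.add seen key) k = (k == key || PySem.Set.contains seen k) := by
  rw [Bool.eq_iff_iff]
  simp only [Bool.or_eq_true, beq_iff_eq, PySem.Set.contains_eq_listContains,
    List.contains_iff_mem]
  rw [show (PySem.Set.add seen key : List String) = PySem.Set.add seen key from rfl]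
  constructor
  · intro hx
    have := (PySem.Set.mem_add seen key k).mp hx
    tauto
  · intro hx
    apply (PySem.Set.mem_add seen key k).mpr
    tauto

theorem pvCsJ_eq (word attr : List Int) (i : Int) (fuel : Nat) (j : Int)
    (d : PySem.Dict String Int) (seen : PySem.Set String)
    (hinv : ∀ k, d.contains k = PySem.Set.contains seen k) :
    (csJ word attr i d j fuel).1 = (csAltJ word (pvAttrSet word attr) i seen j fuel).1 ∧
      ((csJ word attr i d j fuel).1 = none →
        ∀ k, (csJ word attr i d j fuel).2.contains k =
          PySem.Set.contains (csAltJ word (pvAttrSet word attr) i seen j fuel).2 k) := by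
  induction fuel generalizing j d seen with
  | zero => exact ⟨rfl, fun _ => hinv⟩
  | succ fuel ih =>
    simp only [csJ, csAltJ]
    have hck := hinv (pyKey (PySem.List.slice word (some j) (some (j + i))))
    by_cases hc : d.contains (pyKey (PySem.List.slice word (some j) (some (j + i)))) = true
    · rw [if_pos hc, if_pos (hck ▸ hc)]
      exact ih (j + 1) d seen hinv
    · rw [if_neg hc, if_neg (hck ▸ hc)]
      cases hcr : crosses_attractor (PySem.List.slice word (some j) (some (j + i))) word attr with
      | some r =>
        have hcov : is_covered (PySem.List.slice word (some j) (some (j + i))) word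
            (pvAttrSet word attr) = true := by
          rcases Bool.eq_false_or_eq_true (is_covered (PySem.List.slice word (some j) (some (j + i)))
              word (pvAttrSet word attr)) with hX | hX
          · exact hX
          · rw [← pvCross_iff] at hX; rw [hX] at hcr; cases hcr
        rw [if_pos hcov]
        apply ih
        intro k
        rw [PySem.Dict.contains_insert, pvSetContainsAdd, hinv k]
      | none =>
        have hcov : is_covered (PySem.List.slice word (some j) (some (j + i))) word
            (pvAttrSet word attr) = false := (pvCross_iff _ _ _).mp hcr
        rw [if_neg (by rw [hcov]; exact Bool.false_ne_true)]
        exact ⟨rfl, fun h => absurd h (by simp)⟩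

theorem pvCsI_eq (start end_ : Int) (word attr : List Int) (fuel : Nat) (i : Int)
    (d : PySem.Dict String Int) (seen : PySem.Set String)
    (hinv : ∀ k, d.contains k = PySem.Set.contains seen k) :
    csI start end_ word attr d i fuel = csAltI start end_ word (pvAttrSet word attr) seen i fuel := by
  induction fuel generalizing i d seen with
  | zero => rfl
  | succ fuel ih =>
    simp only [csI, csAltI]
    obtain ⟨h1, h2⟩ := pvCsJ_eq word attr i ((end_ + 2 - i) - start).toNat start d seen hinv
    cases hA : (csJ word attr i d start ((end_ + 2 - i) - start).toNat).1 with
    | some res =>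
      rw [hA] at h1
      rw [show csJ word attr i d start ((end_ + 2 - i) - start).toNat =
        ((csJ word attr i d start _).1, (csJ word attr i d start _).2) from rfl, hA]
      rw [show csAltJ word (pvAttrSet word attr) i seen start ((end_ + 2 - i) - start).toNat =
        ((csAltJ word (pvAttrSet word attr) i seen start _).1,
         (csAltJ word (pvAttrSet word attr) i seen start _).2) from rfl, ← h1]
    | none =>
      rw [hA] at h1
      rw [show csJ word attr i d start ((end_ + 2 - i) - start).toNat =
        ((csJ word attr i d start _).1, (csJ word attr i d start _).2) from rfl, hA]
      rw [show csAltJ word (pvAttrSet word attr) i seen start ((end_ + 2 - i) - start).toNat =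
        ((csAltJ word (pvAttrSet word attr) i seen start _).1,
         (csAltJ word (pvAttrSet word attr) i seen start _).2) from rfl, ← h1]
      exact ih _ _ _ (h2 hA)

theorem pvInit_inv (factors : List (String × Int)) (k : String) :
    (PySem.Dict.ofList factors).contains k =
      PySem.Set.contains (PySem.Set.ofList (factors.map (·.1))) k := by
  rw [Bool.eq_iff_iff, PySem.Dict.contains_iff_mem_keys, PySem.Set.contains_iff,
    PySem.Set.mem_ofList]
  show k ∈ (List.foldl (fun d p => d.insert p.1 p.2) PySem.Dict.empty factors).keys ↔ _
  rw [PySem.Dict.keys_foldl_insert_key factors (·.1) (fun d p => p.2) PySem.Dict.empty]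
  simp [PySem.Set.mem_update, PySem.Dict.keys_empty]

-- ===== VERDICT (by name: the statement is the Claim_ definition above) =====
theorem check_subfactors_spec : Claim_equal_check_subfactors := by
  intro start end_ word attr factors _
  unfold Spec_check_subfactors check_subfactors check_subfactors_alt
  exact pvCsI_eq start end_ word attr _ _ _ _ (pvInit_inv factors)
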